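-- pv_equiv track=rewrite | github.com/murjune/today_junelog | 스터디/해커랭크/string_manimulation/0_alternating-characters.py | alternatingCharacters
-- ===== SOURCE A (Python) =====
-- def alternatingCharacters(s):
--     # Write your code here
--     tmp = s[0] # 시작 문자
--     n = len(s)
--     cnt = 0 # 문자를 delete한 개수
--     for i in range(1,n):
--         if (s[i] == tmp): # 같은 문자면 삭제
--             cnt += 1
--         else:
--             tmp = s[i] # 다른 문자면 tmp 바꾸기
--     return cnt
-- ===== SOURCE B (Python) =====
-- def alternatingCharacters(s):
--     # Collapse s into maximal runs of equal characters: answer = len(s) - number of runs.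
--     n = len(s)
--     groups = 0
--     i = 0
--     while i < n:
--         c = s[i]
--         while i < n and s[i] == c:  # advance past the whole run of c
--             i += 1
--         groups += 1
--     return n - groups
-- ===== Notes on version B (the rewrite author's own statement) =====
-- stated objective: alternative
-- what changed: B collapses the string into maximal runs of equal characters and returns len(s) minus the number of runs, instead of A's single scan comparing each character to a tracked previous character and counting deletions.
import Mathlib
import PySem

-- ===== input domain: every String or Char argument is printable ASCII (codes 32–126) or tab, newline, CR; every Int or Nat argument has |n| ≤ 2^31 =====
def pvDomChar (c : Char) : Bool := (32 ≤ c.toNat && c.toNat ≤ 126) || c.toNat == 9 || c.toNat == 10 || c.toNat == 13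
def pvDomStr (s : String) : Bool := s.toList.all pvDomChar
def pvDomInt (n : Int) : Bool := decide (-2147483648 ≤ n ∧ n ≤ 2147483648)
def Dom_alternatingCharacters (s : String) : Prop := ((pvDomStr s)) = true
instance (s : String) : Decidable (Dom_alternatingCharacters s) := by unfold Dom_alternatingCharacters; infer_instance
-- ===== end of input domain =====

-- B collapses the string into maximal runs of equal characters and returns len(s) minus
-- the number of runs; A counts deletions in one scan against a tracked previous character.
-- Equal wherever A returns; A raises IndexError on "" (excluded by Pre_), where B returns 0.

-- ===== PORT A =====
-- tmp = s[0]; for i in range(1,n): if s[i]==tmp: cnt+=1 else tmp=s[i]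
-- (the loop over indices 1..n-1 reads exactly the tail of the character list)
def alternatingCharacters (s : String) : Int :=
  match s.toList with
  | [] => 0  -- A raises IndexError here (s[0]); excluded by Pre_
  | tmp :: rest =>
    (rest.foldl (fun (p : Char × Int) c =>
      if c == p.1 then (p.1, p.2 + 1) else (c, p.2)) (tmp, 0)).2

-- ===== PORT B =====
-- inner while: advance past the leading run of c (t = t[j:])
def pvRun (c : Char) : List Char → List Char
  | [] => []
  | x :: xs => if x == c then pvRun c xs else x :: xs

theorem pvRun_length_le (c : Char) : ∀ l : List Char, (pvRun c l).length ≤ l.length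
  | [] => le_refl _
  | x :: xs => by
    simp only [pvRun]
    split
    · exact le_trans (pvRun_length_le c xs) (Nat.le_succ _)
    · exact le_refl _

-- outer while: one iteration per run
def pvGroups : List Char → Nat
  | [] => 0
  | c :: xs => 1 + pvGroups (pvRun c xs)
termination_by l => l.length
decreasing_by
  simp only [List.length_cons]
  exact Nat.lt_succ_of_le (pvRun_length_le _ _)

def alternatingCharacters_alt (s : String) : Int :=
  (s.toList.length : Int) - (pvGroups s.toList : Int)

-- ===== PRECONDITION & SPEC =====
-- Pre_ excludes only the empty string, on which A raises IndexError (s[0]).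
def Pre_alternatingCharacters (s : String) : Prop := s ≠ ""
instance (s : String) : Decidable (Pre_alternatingCharacters s) := by
  unfold Pre_alternatingCharacters; infer_instance
def pvWitness_alternatingCharacters : String := ("aabba")

def Spec_alternatingCharacters (s : String) (out : Int) : Prop := out = alternatingCharacters_alt s
instance (s : String) (out : Int) : Decidable (Spec_alternatingCharacters s out) := by unfold Spec_alternatingCharacters; infer_instance

-- ===== CLAIM (what is proved, stated in full; the proofs are below) =====
def Claim_equal_alternatingCharacters : Prop := ∀ (s : String), Dom_alternatingCharacters s → Pre_alternatingCharacters s → Spec_alternatingCharacters s (alternatingCharacters s)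

-- ===== LEMMAS AND PROOFS =====

theorem foldA_eq (l : List Char) : ∀ (tmp : Char) (cnt : Int),
    (l.foldl (fun (p : Char × Int) c =>
      if c == p.1 then (p.1, p.2 + 1) else (c, p.2)) (tmp, cnt)).2
      = cnt + (l.length : Int) + 1 - (pvGroups (tmp :: l) : Int) := by
  induction l with
  | nil =>
    intro tmp cnt
    simp [pvGroups, pvRun]
  | cons x xs ih =>
    intro tmp cnt
    by_cases h : x = tmp
    · subst h
      simp only [List.foldl_cons, beq_self_eq_true, if_pos]
      rw [ih x (cnt + 1)]
      have : pvGroups (x :: x :: xs) = pvGroups (x :: xs) := by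
        conv_lhs => rw [pvGroups]
        conv_rhs => rw [pvGroups]
        simp [pvRun]
      rw [this]
      simp only [List.length_cons]
      push_cast
      ring
    · have hb : (x == tmp) = false := by simp [h]
      simp only [List.foldl_cons, hb, if_neg, Bool.false_eq_true, not_false_iff]
      rw [ih x cnt]
      have : pvGroups (tmp :: x :: xs) = 1 + pvGroups (x :: xs) := by
        conv_lhs => rw [pvGroups]
        simp [pvRun, hb]
      rw [this]
      simp only [List.length_cons]
      push_cast
      ring

-- ===== VERDICT (by name: the statement is the Claim_ definition above) =====
theorem alternatingCharacters_spec : Claim_equal_alternatingCharacters := by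
  intro s _ hpre
  unfold Spec_alternatingCharacters alternatingCharacters alternatingCharacters_alt
  have hne : s.toList ≠ [] := by
    simpa [Pre_alternatingCharacters] using hpre
  cases hl : s.toList with
  | nil => exact absurd hl hne
  | cons tmp rest =>
    simp only
    rw [foldA_eq rest tmp 0]
    simp only [List.length_cons]
    push_cast
    ring
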